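-- pv_equiv track=rewrite | github.com/AndresQuimbita/Proyecto | Ejercicio 6/Ejercicio6.py | impar_odd_sum
-- ===== SOURCE A (Python) =====
-- def impar_odd_sum(array):
--     '''
--     Calculate and return the number of all the impar odd sum from sublist of a python list []
--     '''
--     odd = 0
--     arr = []
--     result = []
--     for i in range(len(array)+1):
--         for j in range(i):
--             arr.append(array[j:i])
--     for i in arr:
--         odd = 0
--         for j in range(len(i)):
--             odd += i[j]
--         if (odd % 2) != 0:
--             result.append(i)
--     ans = len(result)
--     return ans % (10**9 + 7)
-- ===== SOURCE B (Python) =====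
-- def impar_odd_sum(array):
--     # prefix-parity counting: a subarray (j,i] has odd sum iff prefix parities at j and i differ
--     ans = 0
--     p = 0
--     even, odd = 1, 0
--     for x in array:
--         p = (p + x) % 2
--         if p != 0:
--             ans += even
--             odd += 1
--         else:
--             ans += odd
--             even += 1
--     return ans % (10**9 + 7)
-- ===== Notes on version B (the rewrite author's own statement) =====
-- stated objective: faster
-- what changed: Replaced the O(n^3) enumerate-all-subarrays-then-sum-each approach with a single O(n) pass over prefix-sum parities (a subarray has odd sum iff its endpoints' prefix parities differ), counting matches with running even/odd prefix counters.
import Mathlib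
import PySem

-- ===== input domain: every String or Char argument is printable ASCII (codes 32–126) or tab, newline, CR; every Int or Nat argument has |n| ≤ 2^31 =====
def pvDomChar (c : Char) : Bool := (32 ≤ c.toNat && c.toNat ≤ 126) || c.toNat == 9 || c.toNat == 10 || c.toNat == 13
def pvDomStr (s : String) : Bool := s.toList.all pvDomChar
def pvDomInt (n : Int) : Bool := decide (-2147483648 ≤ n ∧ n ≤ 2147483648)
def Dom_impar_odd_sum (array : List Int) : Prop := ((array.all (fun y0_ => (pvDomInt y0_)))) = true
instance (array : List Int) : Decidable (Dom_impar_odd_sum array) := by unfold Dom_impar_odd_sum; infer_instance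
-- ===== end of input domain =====

-- B replaces A's enumerate-every-subarray-and-sum-it strategy (O(n^3)) by one O(n) pass
-- counting prefix-sum parities (a subarray has odd sum iff its two endpoint prefixes differ in parity).

-- ===== PORT A =====
def impar_odd_sum (array : List Int) : Int :=
  let arr : List (List Int) :=
    (PySem.List.pyRange 0 ((array.length : Int) + 1) 1).foldl (fun arr i =>
      (PySem.List.pyRange 0 i 1).foldl (fun arr j =>
        arr ++ [PySem.List.slice array (some j) (some i)]) arr) []
  let result : List (List Int) :=
    arr.foldl (fun result i =>
      let odd : Int :=
        (PySem.List.pyRange 0 ((i.length : Int)) 1).foldl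
          (fun odd j => odd + PySem.List.pyGetD i j 0) 0
      if PySem.Int.mod odd 2 ≠ 0 then result ++ [i] else result) []
  let ans : Int := (result.length : Int)
  PySem.Int.mod ans (10 ^ 9 + 7)

-- ===== PORT B =====
-- loop body of Source B's single pass: state (ans, p, even, odd)
def pvStepB (st : Int × Int × Int × Int) (x : Int) : Int × Int × Int × Int :=
  let p := PySem.Int.mod (st.2.1 + x) 2
  if p ≠ 0 then (st.1 + st.2.2.1, p, st.2.2.1, st.2.2.2 + 1)
  else (st.1 + st.2.2.2, p, st.2.2.1 + 1, st.2.2.2)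

def impar_odd_sum_alt (array : List Int) : Int :=
  let s := array.foldl pvStepB (0, 0, 1, 0)
  PySem.Int.mod s.1 (10 ^ 9 + 7)

-- ===== PRECONDITION & SPEC =====
def Spec_impar_odd_sum (array : List Int) (out : Int) : Prop := out = impar_odd_sum_alt array
instance (array : List Int) (out : Int) : Decidable (Spec_impar_odd_sum array out) := by unfold Spec_impar_odd_sum; infer_instance

-- ===== CLAIM (what is proved, stated in full; the proofs are below) =====
def Claim_equal_impar_odd_sum : Prop := ∀ (array : List Int), Dom_impar_odd_sum array → Spec_impar_odd_sum array (impar_odd_sum array)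

-- ===== LEMMAS AND PROOFS =====

-- prefix sum of the first k elements, its parity, and the counting quantities
def pvP (array : List Int) (k : Nat) : Int := (array.take k).sum
def pvPar (array : List Int) (k : Nat) : Bool := pvP array k % 2 == 1
def pvMis (array : List Int) (i : Nat) : Nat :=
  (List.range i).countP (fun j => pvPar array j != pvPar array i)
def pvAns (array : List Int) (k : Nat) : Nat := ((List.range (k+1)).map (pvMis array)).sum
def pvEv (array : List Int) (k : Nat) : Nat := (List.range (k+1)).countP (fun j => !pvPar array j)
def pvOd (array : List Int) (k : Nat) : Nat := (List.range (k+1)).countP (fun j => pvPar array j)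

lemma pv_countP_flatMap {α β : Type} (l : List α) (g : α → List β) (q : β → Bool) :
    (l.flatMap g).countP q = (l.map fun x => (g x).countP q).sum := by
  induction l with
  | nil => simp
  | cons a l ih => simp [List.countP_append, ih]

lemma pv_sum_take (array : List Int) (j i : Nat) (hj : j ≤ i) :
    ((array.drop j).take (i - j)).sum = pvP array i - pvP array j := by
  have h : array.take i = array.take j ++ (array.drop j).take (i - j) := by
    have h2 : List.take (j + (i - j)) array = List.take j array ++ List.take (i - j) (List.drop j array) := List.take_add
    rwa [Nat.add_sub_cancel' hj] at h2
  simp [pvP, h]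

lemma pv_slice_parity (array : List Int) (j i : Nat) (hj : j ≤ i) :
    (decide (PySem.Int.mod ((array.drop j).take (i - j)).sum 2 ≠ 0))
      = (pvPar array j != pvPar array i) := by
  rw [PySem.Int.mod_eq_emod_of_pos (by norm_num), pv_sum_take array j i hj]
  unfold pvPar
  have hi := Int.emod_two_eq (pvP array i)
  have hjm := Int.emod_two_eq (pvP array j)
  rcases hi with hi | hi <;> rcases hjm with hjm | hjm <;>
    simp [hi, hjm] <;> omega

lemma pv_sum_loop (l : List Int) :
    (PySem.List.pyRange 0 ((l.length : Int)) 1).foldl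
      (fun odd j => odd + PySem.List.pyGetD l j 0) 0 = l.sum := by
  rw [PySem.List.foldl_pyRange_zero_pyGetD' l 0 (fun a b => a + b) 0]
  induction l using List.reverseRecOn with
  | nil => simp
  | append_singleton xs x ih => simp [List.foldl_append, ih]

-- A's value expressed through the parity counts
lemma pv_A_eq (array : List Int) :
    impar_odd_sum array = PySem.Int.mod ((pvAns array array.length : Nat) : Int) (10 ^ 9 + 7) := by
  unfold impar_odd_sum
  simp only [PySem.List.foldl_append_singleton_eq_map, PySem.List.foldl_append_eq_flatMap,
    List.nil_append]
  simp only [pv_sum_loop]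
  rw [show ((array.length : Int) + 1) = ((array.length + 1 : Nat) : Int) by push_cast; ring]
  simp only [PySem.List.pyRange_zero_natCast, List.flatMap_map]
  rw [PySem.List.foldl_append_ite_eq_filter, List.nil_append, ← List.countP_eq_length_filter]
  rw [pv_countP_flatMap]
  unfold pvAns
  congr 2
  apply congrArg List.sum
  apply List.map_congr_left
  intro k hk
  simp only [List.map_map, List.countP_map]
  unfold pvMis
  apply List.countP_congr
  intro j hj
  have hjk : j ≤ k := le_of_lt (List.mem_range.mp hj)
  simp only [Function.comp, PySem.List.slice_natCast]
  rw [pv_slice_parity array j k hjk]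

-- B's loop invariant
set_option maxRecDepth 4000 in
lemma pv_B_loop (array : List Int) (k : Nat) (hk : k ≤ array.length) :
    (array.take k).foldl pvStepB (0, 0, 1, 0)
      = ((pvAns array k : Int), pvP array k % 2, (pvEv array k : Int), (pvOd array k : Int)) := by
  induction k with
  | zero => simp [pvAns, pvP, pvEv, pvOd, pvMis, pvPar]
  | succ k ih =>
    have hk' : k < array.length := by omega
    have htake : array.take (k+1) = array.take k ++ [array[k]] := by
      rw [List.take_add_one, List.getElem?_eq_getElem hk']; rfl
    have hP : pvP array (k+1) = pvP array k + array[k] := by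
      unfold pvP
      rw [htake, List.sum_append, List.sum_cons, List.sum_nil, add_zero]
    have hAns0 : pvAns array (k+1) = pvAns array k + pvMis array (k+1) := by
      unfold pvAns
      conv_lhs => rw [List.range_succ]
      simp
    have hEv0 : pvEv array (k+1) = pvEv array k + (if pvPar array (k+1) then 0 else 1) := by
      unfold pvEv
      conv_lhs => rw [List.range_succ]
      cases h : pvPar array (k+1) <;> simp [List.countP_append, h]
    have hOd0 : pvOd array (k+1) = pvOd array k + (if pvPar array (k+1) then 1 else 0) := by
      unfold pvOd
      conv_lhs => rw [List.range_succ]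
      cases h : pvPar array (k+1) <;> simp [List.countP_append, h]
    rw [htake, List.foldl_append, ih (by omega)]
    by_cases hpar : pvPar array (k+1) = true
    · have h1 : (pvP array k + array[k]) % 2 = 1 := by
        have : pvP array (k+1) % 2 = 1 := by simpa [pvPar] using hpar
        rwa [hP] at this
      have hMis : pvMis array (k+1) = pvEv array k := by
        simp [pvMis, pvEv, hpar]
      simp [pvStepB, hAns0, hEv0, hOd0, hMis, hpar, h1, hP]
    · have hparf : pvPar array (k+1) = false := by simpa using hpar
      have h0 : (pvP array k + array[k]) % 2 = 0 := by
        have h2 := Int.emod_two_eq (pvP array (k+1))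
        have : pvP array (k+1) % 2 ≠ 1 := by simpa [pvPar] using hparf
        rw [hP] at h2 this
        omega
      have hMis : pvMis array (k+1) = pvOd array k := by
        simp [pvMis, pvOd, hparf]
      simp [pvStepB, hAns0, hEv0, hOd0, hMis, hparf, h0, hP]

lemma pv_B_eq (array : List Int) :
    impar_odd_sum_alt array = PySem.Int.mod ((pvAns array array.length : Nat) : Int) (10 ^ 9 + 7) := by
  have h := pv_B_loop array array.length le_rfl
  rw [List.take_length] at h
  simp [impar_odd_sum_alt, h]

-- ===== VERDICT (by name: the statement is the Claim_ definition above) =====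
theorem impar_odd_sum_spec : Claim_equal_impar_odd_sum := by
  intro array _
  unfold Spec_impar_odd_sum
  rw [pv_A_eq, pv_B_eq]
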